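-- pv_equiv track=rewrite | github.com/JoshuaDunnink/Advent_of_Code | source/2022/day_15.py | sensor_coverage
-- ===== SOURCE A (Python) =====
-- def sensor_coverage(grid, sensors):
--     for sensor in sensors:
--         x_diff = sensor[0][0] - sensor[1][0]
--         y_diff = sensor[0][1] - sensor[1][1]
--         sensor_range = abs(x_diff) + abs(y_diff)
--         for x in range(
--             sensor[0][0] - sensor_range, sensor[0][0] + sensor_range + 1
--         ):
--             grid[sensor[0][1]][x] = (
--                 "#" if grid[sensor[0][1]][x] == "." else grid[sensor[0][1]][x]
--             )
--             for y in range(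
--                 sensor[0][1] - sensor_range, sensor[0][1] + sensor_range + 1
--             ):
--                 diff = abs(sensor[0][0] - x) + abs(sensor[0][1] - y)
--                 if diff <= sensor_range:
--                     grid[y][x] = "#" if grid[y][x] == "." else grid[y][x]
--
--     return grid
-- ===== SOURCE B (Python) =====
-- def sensor_coverage(grid, sensors):
--     for sensor in sensors:
--         sx, sy = sensor[0][0], sensor[0][1]
--         r = abs(sensor[0][0] - sensor[1][0]) + abs(sensor[0][1] - sensor[1][1])
--         for dy in range(-r, r + 1):
--             rem = r - abs(dy)
--             row = grid[sy + dy]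
--             for x in range(sx - rem, sx + rem + 1):
--                 if row[x] == ".":
--                     row[x] = "#"
--     return grid
-- ===== Notes on version B (the rewrite author's own statement) =====
-- stated objective: simpler
-- what changed: B walks each sensor's diamond directly (for each row offset dy, write the contiguous span of width sensor_range-|dy|), replacing A's full (2r+1)x(2r+1) square scan with its per-cell Manhattan-distance test and A's redundant separate horizontal-line write; B touches only ~half the cells and does no distance test.
import Mathlib
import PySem

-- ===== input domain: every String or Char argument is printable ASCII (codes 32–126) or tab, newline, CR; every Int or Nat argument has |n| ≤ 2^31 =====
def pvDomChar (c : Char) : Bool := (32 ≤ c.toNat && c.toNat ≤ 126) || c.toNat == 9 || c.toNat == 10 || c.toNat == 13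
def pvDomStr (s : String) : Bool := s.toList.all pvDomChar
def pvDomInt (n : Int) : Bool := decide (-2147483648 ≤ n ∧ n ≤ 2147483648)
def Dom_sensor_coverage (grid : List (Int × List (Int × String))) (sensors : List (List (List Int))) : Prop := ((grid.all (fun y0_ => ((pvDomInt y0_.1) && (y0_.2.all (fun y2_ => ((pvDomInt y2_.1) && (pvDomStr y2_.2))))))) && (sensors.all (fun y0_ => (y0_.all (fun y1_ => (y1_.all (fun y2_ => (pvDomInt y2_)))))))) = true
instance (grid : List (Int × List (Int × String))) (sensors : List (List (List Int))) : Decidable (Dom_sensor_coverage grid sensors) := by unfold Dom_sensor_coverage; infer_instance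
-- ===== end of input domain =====

-- B replaces A's full-square scan (with a per-cell Manhattan test and a redundant extra row
-- pass) by writing, for each row offset dy, exactly the contiguous span of the diamond —
-- simpler and touching only the covered cells.  Python A mutates `grid` (a dict of dicts) in
-- place and returns it, as does B; the equivalence proved here is about the returned value.

-- ===== PORT A =====
-- transliteration of `grid[y][x] = "#" if grid[y][x] == "." else grid[y][x]` (both Python
-- statements of A have exactly this form); Pre_ guarantees both keys exist (KeyError otherwise)
def pvSetA (g : PySem.Dict Int (PySem.Dict Int String)) (y x : Int) :
    PySem.Dict Int (PySem.Dict Int String) :=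
  let row := g.getD y PySem.Dict.empty
  g.insert y (row.insert x (if row.getD x "" = "." then "#" else row.getD x ""))

def sensor_coverage (grid : List (Int × List (Int × String))) (sensors : List (List (List Int))) :
    List (Int × List (Int × String)) :=
  let g0 : PySem.Dict Int (PySem.Dict Int String) :=
    PySem.Dict.mk (grid.map (fun p => (p.1, PySem.Dict.mk p.2)))
  let gfin := sensors.foldl (fun g sensor =>
    let x_diff := PySem.List.pyGetD (PySem.List.pyGetD sensor 0 []) 0 0
                - PySem.List.pyGetD (PySem.List.pyGetD sensor 1 []) 0 0
    let y_diff := PySem.List.pyGetD (PySem.List.pyGetD sensor 0 []) 1 0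
                - PySem.List.pyGetD (PySem.List.pyGetD sensor 1 []) 1 0
    let sensor_range := |x_diff| + |y_diff|
    (PySem.List.pyRange
        (PySem.List.pyGetD (PySem.List.pyGetD sensor 0 []) 0 0 - sensor_range)
        (PySem.List.pyGetD (PySem.List.pyGetD sensor 0 []) 0 0 + sensor_range + 1)).foldl
      (fun g x =>
        let g := pvSetA g (PySem.List.pyGetD (PySem.List.pyGetD sensor 0 []) 1 0) x
        (PySem.List.pyRange
            (PySem.List.pyGetD (PySem.List.pyGetD sensor 0 []) 1 0 - sensor_range)
            (PySem.List.pyGetD (PySem.List.pyGetD sensor 0 []) 1 0 + sensor_range + 1)).foldl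
          (fun g y =>
            if |PySem.List.pyGetD (PySem.List.pyGetD sensor 0 []) 0 0 - x|
                + |PySem.List.pyGetD (PySem.List.pyGetD sensor 0 []) 1 0 - y| ≤ sensor_range
            then pvSetA g y x else g) g) g) g0
  gfin.items.map (fun p => (p.1, p.2.items))

-- ===== PORT B =====
def sensor_coverage_alt (grid : List (Int × List (Int × String))) (sensors : List (List (List Int))) :
    List (Int × List (Int × String)) :=
  let g0 : PySem.Dict Int (PySem.Dict Int String) :=
    PySem.Dict.mk (grid.map (fun p => (p.1, PySem.Dict.mk p.2)))
  let gfin := sensors.foldl (fun g sensor =>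
    let sx := PySem.List.pyGetD (PySem.List.pyGetD sensor 0 []) 0 0
    let sy := PySem.List.pyGetD (PySem.List.pyGetD sensor 0 []) 1 0
    let r := |PySem.List.pyGetD (PySem.List.pyGetD sensor 0 []) 0 0
              - PySem.List.pyGetD (PySem.List.pyGetD sensor 1 []) 0 0|
           + |PySem.List.pyGetD (PySem.List.pyGetD sensor 0 []) 1 0
              - PySem.List.pyGetD (PySem.List.pyGetD sensor 1 []) 1 0|
    (PySem.List.pyRange (-r) (r + 1)).foldl (fun g dy =>
      let rem := r - |dy|
      let row := g.getD (sy + dy) PySem.Dict.empty   -- row = grid[sy + dy] (Python mutates it in place)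
      g.insert (sy + dy)
        ((PySem.List.pyRange (sx - rem) (sx + rem + 1)).foldl
          (fun row x => if row.getD x "" = "." then row.insert x "#" else row) row)) g) g0
  gfin.items.map (fun p => (p.1, p.2.items))

-- ===== PRECONDITION & SPEC =====
-- sensor field accessors, used by Pre_ to state which grid cells Python A reads/writes
def pvSx (s : List (List Int)) : Int := PySem.List.pyGetD (PySem.List.pyGetD s 0 []) 0 0
def pvSy (s : List (List Int)) : Int := PySem.List.pyGetD (PySem.List.pyGetD s 0 []) 1 0
def pvR (s : List (List Int)) : Int :=
  |PySem.List.pyGetD (PySem.List.pyGetD s 0 []) 0 0 - PySem.List.pyGetD (PySem.List.pyGetD s 1 []) 0 0|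
  + |PySem.List.pyGetD (PySem.List.pyGetD s 0 []) 1 0 - PySem.List.pyGetD (PySem.List.pyGetD s 1 []) 1 0|
-- Pre_ = exactly the inputs on which Python A returns: duplicate keys cannot arise from a
-- Python dict (grid and each row are dicts), a sensor with fewer than 2 points (or a point
-- with fewer than 2 coordinates) raises IndexError, and a diamond cell missing from the grid
-- raises KeyError.  "Every diamond cell is a key" is stated by counting, per sensor, the grid
-- rows whose key lies in [sy-r, sy+r] and, in each such row, the keys in the diamond's x-span
-- (with distinct keys, the count equals the interval size iff the whole interval is present),
-- so that Pre_ is decidable in time proportional to the grid, not to the sensor range.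
def Pre_sensor_coverage (grid : List (Int × List (Int × String))) (sensors : List (List (List Int))) : Prop :=
  (grid.map Prod.fst).Nodup ∧ (∀ p ∈ grid, (p.2.map Prod.fst).Nodup) ∧
  ∀ s ∈ sensors, 2 ≤ s.length ∧ 2 ≤ (s.getD 0 []).length ∧ 2 ≤ (s.getD 1 []).length ∧
    (((grid.map Prod.fst).filter
        (fun y => decide (pvSy s - pvR s ≤ y ∧ y ≤ pvSy s + pvR s))).length
      = (2 * pvR s + 1).toNat) ∧
    ∀ p ∈ grid, pvSy s - pvR s ≤ p.1 → p.1 ≤ pvSy s + pvR s →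
      ((p.2.map Prod.fst).filter
          (fun x => decide (pvSx s - (pvR s - |p.1 - pvSy s|) ≤ x ∧
                            x ≤ pvSx s + (pvR s - |p.1 - pvSy s|)))).length
        = (2 * (pvR s - |p.1 - pvSy s|) + 1).toNat

instance (grid : List (Int × List (Int × String))) (sensors : List (List (List Int))) :
    Decidable (Pre_sensor_coverage grid sensors) := by unfold Pre_sensor_coverage; infer_instance

def pvWitness_sensor_coverage : (List (Int × List (Int × String))) × List (List (List Int)) :=
  ([(1, [(1, "."), (2, "."), (3, "B")]),
    (2, [(1, "."), (2, "S"), (3, ".")]),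
    (3, [(1, "#"), (2, "."), (3, ".")])],
   [[[2, 2], [2, 3]]])

def Spec_sensor_coverage (grid : List (Int × List (Int × String))) (sensors : List (List (List Int))) (out : List (Int × List (Int × String))) : Prop := out = sensor_coverage_alt grid sensors
instance (grid : List (Int × List (Int × String))) (sensors : List (List (List Int))) (out : List (Int × List (Int × String))) : Decidable (Spec_sensor_coverage grid sensors out) := by unfold Spec_sensor_coverage; infer_instance

-- ===== CLAIM (what is proved, stated in full; the proofs are below) =====
def Claim_equal_sensor_coverage : Prop := ∀ (grid : List (Int × List (Int × String))) (sensors : List (List (List Int))), Dom_sensor_coverage grid sensors → Pre_sensor_coverage grid sensors → Spec_sensor_coverage grid sensors (sensor_coverage grid sensors)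

-- ===== LEMMAS AND PROOFS =====

-- the cells of a sensor's diamond (one contiguous x-span per row offset dy)
def pvCells (s : List (List Int)) : List (Int × Int) :=
  (PySem.List.pyRange (-(pvR s)) (pvR s + 1)).flatMap (fun dy =>
    (PySem.List.pyRange (pvSx s - (pvR s - |dy|)) (pvSx s + (pvR s - |dy|) + 1)).map
      (fun x => (pvSy s + dy, x)))

-- the per-sensor loop bodies of the two ports, named so the proofs can speak about them
def pvStepA (sensor : List (List Int)) (g : PySem.Dict Int (PySem.Dict Int String)) :
    PySem.Dict Int (PySem.Dict Int String) :=
  let x_diff := PySem.List.pyGetD (PySem.List.pyGetD sensor 0 []) 0 0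
              - PySem.List.pyGetD (PySem.List.pyGetD sensor 1 []) 0 0
  let y_diff := PySem.List.pyGetD (PySem.List.pyGetD sensor 0 []) 1 0
              - PySem.List.pyGetD (PySem.List.pyGetD sensor 1 []) 1 0
  let sensor_range := |x_diff| + |y_diff|
  (PySem.List.pyRange
      (PySem.List.pyGetD (PySem.List.pyGetD sensor 0 []) 0 0 - sensor_range)
      (PySem.List.pyGetD (PySem.List.pyGetD sensor 0 []) 0 0 + sensor_range + 1)).foldl
    (fun g x =>
      let g := pvSetA g (PySem.List.pyGetD (PySem.List.pyGetD sensor 0 []) 1 0) x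
      (PySem.List.pyRange
          (PySem.List.pyGetD (PySem.List.pyGetD sensor 0 []) 1 0 - sensor_range)
          (PySem.List.pyGetD (PySem.List.pyGetD sensor 0 []) 1 0 + sensor_range + 1)).foldl
        (fun g y =>
          if |PySem.List.pyGetD (PySem.List.pyGetD sensor 0 []) 0 0 - x|
              + |PySem.List.pyGetD (PySem.List.pyGetD sensor 0 []) 1 0 - y| ≤ sensor_range
          then pvSetA g y x else g) g) g

def pvStepB (sensor : List (List Int)) (g : PySem.Dict Int (PySem.Dict Int String)) :
    PySem.Dict Int (PySem.Dict Int String) :=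
  let sx := PySem.List.pyGetD (PySem.List.pyGetD sensor 0 []) 0 0
  let sy := PySem.List.pyGetD (PySem.List.pyGetD sensor 0 []) 1 0
  let r := |PySem.List.pyGetD (PySem.List.pyGetD sensor 0 []) 0 0
            - PySem.List.pyGetD (PySem.List.pyGetD sensor 1 []) 0 0|
         + |PySem.List.pyGetD (PySem.List.pyGetD sensor 0 []) 1 0
            - PySem.List.pyGetD (PySem.List.pyGetD sensor 1 []) 1 0|
  (PySem.List.pyRange (-r) (r + 1)).foldl (fun g dy =>
    let rem := r - |dy|
    let row := g.getD (sy + dy) PySem.Dict.empty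
    g.insert (sy + dy)
      ((PySem.List.pyRange (sx - rem) (sx + rem + 1)).foldl
        (fun row x => if row.getD x "" = "." then row.insert x "#" else row) row)) g

def pvToD (grid : List (Int × List (Int × String))) : PySem.Dict Int (PySem.Dict Int String) :=
  PySem.Dict.mk (grid.map (fun p => (p.1, PySem.Dict.mk p.2)))

lemma portA_eq (grid : List (Int × List (Int × String))) (sensors : List (List (List Int))) :
    sensor_coverage grid sensors =
      ((sensors.foldl (fun g s => pvStepA s g) (pvToD grid)).items.map (fun p => (p.1, p.2.items))) := rfl

lemma portB_eq (grid : List (Int × List (Int × String))) (sensors : List (List (List Int))) :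
    sensor_coverage_alt grid sensors =
      ((sensors.foldl (fun g s => pvStepB s g) (pvToD grid)).items.map (fun p => (p.1, p.2.items))) := rfl

-- canonical "mark a set of cells" operation and grid invariants
def pvM (v : String) : String := if v = "." then "#" else v

def pvRowM (P : Int → Bool) (d : PySem.Dict Int String) : PySem.Dict Int String :=
  PySem.Dict.mk (d.items.map (fun q => if P q.1 then (q.1, pvM q.2) else q))

def pvGM (Q : Int → Int → Bool) (g : PySem.Dict Int (PySem.Dict Int String)) :
    PySem.Dict Int (PySem.Dict Int String) :=
  PySem.Dict.mk (g.items.map (fun p => (p.1, pvRowM (Q p.1) p.2)))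

def pvOk (g : PySem.Dict Int (PySem.Dict Int String)) : Prop :=
  g.keys.Nodup ∧ ∀ p ∈ g.items, p.2.keys.Nodup

def pvPres (g : PySem.Dict Int (PySem.Dict Int String)) (y x : Int) : Prop :=
  ∃ p ∈ g.items, p.1 = y ∧ x ∈ p.2.keys

lemma pvM_idem (v : String) : pvM (pvM v) = pvM v := by unfold pvM; split_ifs <;> simp_all

lemma keys_rowM (P : Int → Bool) (d : PySem.Dict Int String) : (pvRowM P d).keys = d.keys := by
  simp only [pvRowM, PySem.Dict.keys, List.map_map]
  apply List.map_congr_left; intro q _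
  by_cases h : P q.1 <;> simp [h]

lemma items_GM (Q : Int → Int → Bool) (g : PySem.Dict Int (PySem.Dict Int String)) :
    (pvGM Q g).items = g.items.map (fun p => (p.1, pvRowM (Q p.1) p.2)) := rfl

lemma keys_GM (Q : Int → Int → Bool) (g : PySem.Dict Int (PySem.Dict Int String)) :
    (pvGM Q g).keys = g.keys := by
  simp only [pvGM, PySem.Dict.keys, List.map_map]
  apply List.map_congr_left; intro p _; rfl

lemma ok_GM (Q : Int → Int → Bool) (g : PySem.Dict Int (PySem.Dict Int String)) :
    pvOk (pvGM Q g) ↔ pvOk g := by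
  unfold pvOk
  rw [keys_GM]
  simp only [items_GM, List.forall_mem_map, keys_rowM]

lemma pres_GM (Q : Int → Int → Bool) (g : PySem.Dict Int (PySem.Dict Int String)) (y x : Int) :
    pvPres (pvGM Q g) y x ↔ pvPres g y x := by
  unfold pvPres
  constructor
  · rintro ⟨p', hp', h1, h2⟩
    rw [items_GM] at hp'
    obtain ⟨p, hp, rfl⟩ := List.mem_map.mp hp'
    exact ⟨p, hp, h1, by simpa [keys_rowM] using h2⟩
  · rintro ⟨p, hp, h1, h2⟩
    exact ⟨(p.1, pvRowM (Q p.1) p.2), by rw [items_GM]; exact List.mem_map_of_mem hp, h1, by simpa [keys_rowM] using h2⟩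

lemma rowM_congr {P P' : Int → Bool} (h : ∀ x, P x = P' x) (d : PySem.Dict Int String) :
    pvRowM P d = pvRowM P' d := by
  apply PySem.Dict.ext
  simp only [pvRowM]
  apply List.map_congr_left; intro q _; rw [h q.1]

lemma rowM_false (d : PySem.Dict Int String) : pvRowM (fun _ => false) d = d := by
  apply PySem.Dict.ext
  simp [pvRowM]

lemma rowM_comp (P P' : Int → Bool) (d : PySem.Dict Int String) :
    pvRowM P' (pvRowM P d) = pvRowM (fun x => P x || P' x) d := by
  apply PySem.Dict.ext
  simp only [pvRowM, List.map_map]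
  apply List.map_congr_left; intro q _
  by_cases h1 : P q.1 <;> by_cases h2 : P' q.1 <;> simp [Function.comp, h1, h2, pvM_idem]

lemma GM_congr {Q Q' : Int → Int → Bool} (h : ∀ y x, Q y x = Q' y x)
    (g : PySem.Dict Int (PySem.Dict Int String)) : pvGM Q g = pvGM Q' g := by
  apply PySem.Dict.ext
  simp only [items_GM]
  apply List.map_congr_left; intro p _
  rw [rowM_congr (h p.1)]

lemma GM_false (g : PySem.Dict Int (PySem.Dict Int String)) : pvGM (fun _ _ => false) g = g := by
  apply PySem.Dict.ext
  simp [items_GM, rowM_false]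

lemma GM_comp (P Q : Int → Int → Bool) (g : PySem.Dict Int (PySem.Dict Int String)) :
    pvGM Q (pvGM P g) = pvGM (fun y x => P y x || Q y x) g := by
  apply PySem.Dict.ext
  simp only [items_GM, List.map_map]
  apply List.map_congr_left; intro p _
  simp [Function.comp, rowM_comp]

lemma insert_mark_eq_rowM {d : PySem.Dict Int String} {x : Int}
    (hnd : d.keys.Nodup) (hx : x ∈ d.keys) :
    d.insert x (pvM (d.getD x "")) = pvRowM (fun x' => x' == x) d := by
  have hc : d.contains x := (PySem.Dict.contains_iff_mem_keys d x).mpr hx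
  apply PySem.Dict.ext
  rw [PySem.Dict.items_insert_of_contains d _ hc]
  simp only [pvRowM]
  apply List.map_congr_left; intro q hq
  by_cases h : q.1 = x
  · have hmem : (x, q.2) ∈ d.items := by rw [← h]; exact hq
    have hval : d.getD x "" = q.2 := PySem.Dict.getD_of_mem_items d hmem hnd ""
    simp [h, hval]
  · simp [h]

lemma rowstepB_eq_rowM {d : PySem.Dict Int String} {x : Int}
    (hnd : d.keys.Nodup) (hx : x ∈ d.keys) :
    (if d.getD x "" = "." then d.insert x "#" else d) = pvRowM (fun x' => x' == x) d := by
  by_cases h : d.getD x "" = "."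
  · rw [if_pos h, ← insert_mark_eq_rowM hnd hx, show pvM (d.getD x "") = "#" from by simp [pvM, h]]
  · rw [if_neg h]
    apply PySem.Dict.ext
    simp only [pvRowM]
    have : ∀ q ∈ d.items, (if (q.1 == x) = true then (q.1, pvM q.2) else q) = q := by
      rintro ⟨q1, q2⟩ hq
      by_cases hqx : q1 = x
      · subst hqx
        have hval : d.getD q1 "" = q2 := PySem.Dict.getD_of_mem_items d hq hnd ""
        have hm : pvM q2 = q2 := by simp [pvM, ← hval, h]
        simp [hm]
      · simp [hqx]
    rw [List.map_congr_left this, List.map_id']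

lemma mem_keys_of_pres {g : PySem.Dict Int (PySem.Dict Int String)} {y x : Int}
    (h : pvPres g y x) : y ∈ g.keys := by
  obtain ⟨p, hp, h1, _⟩ := h
  simp only [PySem.Dict.keys]
  exact List.mem_map.mpr ⟨p, hp, h1⟩

lemma row_of_pres {g : PySem.Dict Int (PySem.Dict Int String)} {y x : Int}
    (hok : pvOk g) (h : pvPres g y x) :
    ∃ rowd, (y, rowd) ∈ g.items ∧ g.getD y PySem.Dict.empty = rowd ∧ x ∈ rowd.keys ∧ rowd.keys.Nodup := by
  obtain ⟨p, hp, h1, h2⟩ := h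
  refine ⟨p.2, by rw [← h1]; exact hp, ?_, h2, hok.2 p hp⟩
  exact PySem.Dict.getD_of_mem_items g (by rw [← h1]; exact hp) hok.1 _

lemma setA_eq_GM {g : PySem.Dict Int (PySem.Dict Int String)} {y x : Int}
    (hok : pvOk g) (hp : pvPres g y x) :
    pvSetA g y x = pvGM (fun y' x' => y' == y && x' == x) g := by
  obtain ⟨rowd, hmem, hrow, hx, hrnd⟩ := row_of_pres hok hp
  have hc : g.contains y := (PySem.Dict.contains_iff_mem_keys g y).mpr (mem_keys_of_pres hp)
  apply PySem.Dict.ext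
  show (g.insert y ((g.getD y PySem.Dict.empty).insert x _)).items = _
  rw [hrow, PySem.Dict.items_insert_of_contains _ _ hc]
  simp only [items_GM]
  apply List.map_congr_left
  rintro ⟨q1, q2⟩ hq
  by_cases h : q1 = y
  · subst h
    have hq2 : q2 = rowd := by
      have e1 : g.get? q1 = some q2 := PySem.Dict.get?_of_mem_items g hq hok.1
      have e2 : g.get? q1 = some rowd := PySem.Dict.get?_of_mem_items g hmem hok.1
      exact Option.some.inj (e1.symm.trans e2)
    subst hq2
    simp only [beq_self_eq_true, if_true]
    congr 1
    rw [show (if q2.getD x "" = "." then "#" else q2.getD x "") = pvM (q2.getD x "") from rfl,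
        insert_mark_eq_rowM hrnd hx]
    exact rowM_congr (fun x' => by simp) q2
  · have hb : (q1 == y) = false := by simp [h]
    simp only [hb, Bool.false_and, Bool.false_eq_true, if_false]
    rw [rowM_congr (P' := fun _ => false) (fun x' => by simp) q2, rowM_false]

lemma fold_setA_eq_GM (L : List (Int × Int)) :
    ∀ g : PySem.Dict Int (PySem.Dict Int String), pvOk g → (∀ c ∈ L, pvPres g c.1 c.2) →
    L.foldl (fun g c => pvSetA g c.1 c.2) g = pvGM (fun y x => decide ((y, x) ∈ L)) g := by
  induction L with
  | nil =>
    intro g _ _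
    simp only [List.foldl_nil]
    have h0 : pvGM (fun y x => decide ((y, x) ∈ ([] : List (Int × Int)))) g
        = pvGM (fun _ _ => false) g := GM_congr (fun y x => by simp) g
    rw [h0, GM_false]
  | cons c L ih =>
    intro g hok hpres
    rw [List.foldl_cons, show pvSetA g c.1 c.2 = pvSetA g (c.1, c.2).1 (c.1, c.2).2 from rfl,
        setA_eq_GM hok (hpres c (List.mem_cons_self)),
        ih _ ((ok_GM _ _).mpr hok) (fun c' hc' => (pres_GM _ _ _ _).mpr (hpres c' (List.mem_cons_of_mem _ hc'))),
        GM_comp]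
    apply GM_congr; intro y x
    by_cases h1 : y = c.1 <;> by_cases h2 : x = c.2 <;>
      simp [h1, h2, List.mem_cons, Prod.ext_iff]

lemma fold_setA_ok {L : List (Int × Int)} {g : PySem.Dict Int (PySem.Dict Int String)}
    (hok : pvOk g) (hpres : ∀ c ∈ L, pvPres g c.1 c.2) :
    pvOk (L.foldl (fun g c => pvSetA g c.1 c.2) g) := by
  rw [fold_setA_eq_GM L g hok hpres]; exact (ok_GM _ _).mpr hok

lemma fold_setA_pres {L : List (Int × Int)} {g : PySem.Dict Int (PySem.Dict Int String)} {y x : Int}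
    (hok : pvOk g) (hpres : ∀ c ∈ L, pvPres g c.1 c.2) (h : pvPres g y x) :
    pvPres (L.foldl (fun g c => pvSetA g c.1 c.2) g) y x := by
  rw [fold_setA_eq_GM L g hok hpres]; exact (pres_GM _ _ _ _).mpr h

-- the cells A's per-sensor loop writes, in A's order
def pvCellsA (s : List (List Int)) : List (Int × Int) :=
  (PySem.List.pyRange (pvSx s - pvR s) (pvSx s + pvR s + 1)).flatMap (fun x =>
    (pvSy s, x) ::
      ((PySem.List.pyRange (pvSy s - pvR s) (pvSy s + pvR s + 1)).filter
        (fun y => |pvSx s - x| + |pvSy s - y| ≤ pvR s)).map (fun y => (y, x)))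

lemma stepA_eq (s : List (List Int)) (g : PySem.Dict Int (PySem.Dict Int String)) :
    pvStepA s g = (pvCellsA s).foldl (fun g c => pvSetA g c.1 c.2) g := by
  simp only [pvStepA, pvCellsA, pvSx, pvSy, pvR]
  rw [List.foldl_flatMap]
  congr 1
  funext g x
  rw [List.foldl_cons, List.foldl_map, List.foldl_filter]
  simp only [decide_eq_true_eq]

lemma getD_GM {g : PySem.Dict Int (PySem.Dict Int String)} {y : Int} {rowd : PySem.Dict Int String}
    (Q : Int → Int → Bool) (hok : pvOk g) (h : (y, rowd) ∈ g.items) :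
    (pvGM Q g).getD y PySem.Dict.empty = pvRowM (Q y) rowd := by
  have hm : (y, pvRowM (Q y) rowd) ∈ (pvGM Q g).items := by
    rw [items_GM]
    exact List.mem_map.mpr ⟨(y, rowd), h, rfl⟩
  have hnd : (pvGM Q g).keys.Nodup := by rw [keys_GM]; exact hok.1
  exact PySem.Dict.getD_of_mem_items _ hm hnd _

lemma insert_setA {g : PySem.Dict Int (PySem.Dict Int String)} {y x : Int}
    (hok : pvOk g) (hp : pvPres g y x) (R : PySem.Dict Int String) :
    g.insert y R = (pvSetA g y x).insert y R := by
  have hc : g.contains y := (PySem.Dict.contains_iff_mem_keys g y).mpr (mem_keys_of_pres hp)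
  have hc' : (pvSetA g y x).contains y := by
    rw [setA_eq_GM hok hp]
    exact (PySem.Dict.contains_iff_mem_keys _ y).mpr (by rw [keys_GM]; exact mem_keys_of_pres hp)
  apply PySem.Dict.ext
  rw [PySem.Dict.items_insert_of_contains _ _ hc, PySem.Dict.items_insert_of_contains _ _ hc',
      setA_eq_GM hok hp, items_GM, List.map_map]
  apply List.map_congr_left
  rintro ⟨q1, q2⟩ _
  by_cases h : q1 = y
  · simp [Function.comp, h]
  · have hrm : pvRowM (fun x' => q1 == y && x' == x) q2 = q2 := by
      rw [rowM_congr (P' := fun _ => false) (fun x' => by simp [h]) q2, rowM_false]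
    simp [Function.comp, h, hrm]

lemma rowfold_eq (y : Int) (xs : List Int) :
    ∀ g : PySem.Dict Int (PySem.Dict Int String), pvOk g → y ∈ g.keys →
    (∀ x ∈ xs, pvPres g y x) →
    g.insert y (xs.foldl (fun row x => if row.getD x "" = "." then row.insert x "#" else row)
        (g.getD y PySem.Dict.empty))
      = xs.foldl (fun g x => pvSetA g y x) g := by
  induction xs with
  | nil =>
    intro g hok hy _
    simp only [List.foldl_nil]
    obtain ⟨p, hp, h1⟩ : ∃ p ∈ g.items, p.1 = y := by
      simpa only [PySem.Dict.keys, List.mem_map] using hy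
    have hrow : g.getD y PySem.Dict.empty = p.2 :=
      PySem.Dict.getD_of_mem_items g (by rw [← h1]; exact hp) hok.1 _
    have hc : g.contains y = true := (PySem.Dict.contains_iff_mem_keys g y).mpr hy
    apply PySem.Dict.ext
    rw [PySem.Dict.items_insert_of_contains _ _ hc]
    have hall : ∀ q ∈ g.items, (if (q.1 == y) = true then (y, g.getD y PySem.Dict.empty) else q) = q := by
      rintro ⟨q1, q2⟩ hq
      by_cases h : q1 = y
      · subst h
        have e1 : g.get? q1 = some q2 := PySem.Dict.get?_of_mem_items g hq hok.1
        have e2 : g.get? q1 = some p.2 := PySem.Dict.get?_of_mem_items g (by rw [← h1]; exact hp) hok.1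
        have e3 : q2 = p.2 := Option.some.inj (e1.symm.trans e2)
        simp [hrow, ← e3]
      · simp [h]
    rw [List.map_congr_left hall, List.map_id']
  | cons x xs ih =>
    intro g hok hy hpres
    have hpx : pvPres g y x := hpres x List.mem_cons_self
    obtain ⟨rowd, hmem, hrow, hxk, hrnd⟩ := row_of_pres hok hpx
    have e1 : (if (g.getD y PySem.Dict.empty).getD x "" = "."
        then (g.getD y PySem.Dict.empty).insert x "#" else (g.getD y PySem.Dict.empty))
        = (pvSetA g y x).getD y PySem.Dict.empty := by
      rw [hrow, rowstepB_eq_rowM hrnd hxk, setA_eq_GM hok hpx, getD_GM _ hok hmem]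
      apply rowM_congr; intro x'; simp
    simp only [List.foldl_cons]
    rw [e1, insert_setA hok hpx]
    exact ih (pvSetA g y x)
      (by rw [setA_eq_GM hok hpx]; exact (ok_GM _ _).mpr hok)
      (by rw [setA_eq_GM hok hpx, keys_GM]; exact hy)
      (fun x' hx' => by
        rw [setA_eq_GM hok hpx]
        exact (pres_GM _ _ _ _).mpr (hpres x' (List.mem_cons_of_mem _ hx')))

lemma stepB_eq_aux (s : List (List Int)) (dys : List Int) :
    ∀ g : PySem.Dict Int (PySem.Dict Int String), pvOk g →
    (∀ dy ∈ dys, pvSy s + dy ∈ g.keys) →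
    (∀ dy ∈ dys, ∀ x ∈ PySem.List.pyRange (pvSx s - (pvR s - |dy|)) (pvSx s + (pvR s - |dy|) + 1),
        pvPres g (pvSy s + dy) x) →
    dys.foldl (fun g dy =>
        g.insert (pvSy s + dy)
          ((PySem.List.pyRange (pvSx s - (pvR s - |dy|)) (pvSx s + (pvR s - |dy|) + 1)).foldl
            (fun row x => if row.getD x "" = "." then row.insert x "#" else row)
            (g.getD (pvSy s + dy) PySem.Dict.empty))) g
      = (dys.flatMap (fun dy =>
          (PySem.List.pyRange (pvSx s - (pvR s - |dy|)) (pvSx s + (pvR s - |dy|) + 1)).map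
            (fun x => (pvSy s + dy, x)))).foldl (fun g c => pvSetA g c.1 c.2) g := by
  induction dys with
  | nil => intro g _ _ _; simp
  | cons dy dys ih =>
    intro g hok hkeys hpres
    simp only [List.foldl_cons, List.flatMap_cons]
    rw [List.foldl_append]
    have hxs := hpres dy List.mem_cons_self
    have e1 := rowfold_eq (pvSy s + dy)
      (PySem.List.pyRange (pvSx s - (pvR s - |dy|)) (pvSx s + (pvR s - |dy|) + 1)) g
      hok (hkeys dy List.mem_cons_self) hxs
    rw [e1, List.foldl_map]
    set L := (PySem.List.pyRange (pvSx s - (pvR s - |dy|)) (pvSx s + (pvR s - |dy|) + 1)).map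
      (fun x => (pvSy s + dy, x)) with hL
    have hpresL : ∀ c ∈ L, pvPres g c.1 c.2 := by
      intro c hc
      obtain ⟨x, hx, rfl⟩ := List.mem_map.mp hc
      exact hxs x hx
    have e2 : (PySem.List.pyRange (pvSx s - (pvR s - |dy|)) (pvSx s + (pvR s - |dy|) + 1)).foldl
        (fun g x => pvSetA g (pvSy s + dy) x) g = L.foldl (fun g c => pvSetA g c.1 c.2) g := by
      rw [hL, List.foldl_map]
    rw [e2]
    exact ih _ (fold_setA_ok hok hpresL)
      (fun dy' h' => by
        rw [fold_setA_eq_GM L g hok hpresL, keys_GM]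
        exact hkeys dy' (List.mem_cons_of_mem _ h'))
      (fun dy' h' x hx => fold_setA_pres hok hpresL (hpres dy' (List.mem_cons_of_mem _ h') x hx))

lemma mem_cells (s : List (List Int)) (y x : Int) :
    (y, x) ∈ pvCells s ↔ |pvSx s - x| + |pvSy s - y| ≤ pvR s := by
  unfold pvCells
  simp only [List.mem_flatMap, List.mem_map, PySem.List.mem_pyRange_one, Prod.mk.injEq]
  constructor
  · rintro ⟨dy, ⟨hd1, hd2⟩, x', ⟨hx1, hx2⟩, hy, rfl⟩
    have ha : |dy| ≤ pvR s := abs_le.mpr (by omega)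
    have hb : |pvSx s - x'| ≤ pvR s - |dy| := abs_le.mpr (by omega)
    have hc : |pvSy s - y| = |dy| := by rw [← hy]; rw [show pvSy s - (pvSy s + dy) = -dy by ring, abs_neg]
    omega
  · intro h
    have h0 := abs_nonneg (pvSx s - x)
    have h1 := abs_nonneg (pvSy s - y)
    refine ⟨y - pvSy s, ⟨?_, ?_⟩, x, ⟨?_, ?_⟩, by ring, rfl⟩
    · have : |y - pvSy s| ≤ pvR s := by
        rw [show y - pvSy s = -(pvSy s - y) by ring, abs_neg]; omega
      have := abs_le.mp this; omega
    · have : |y - pvSy s| ≤ pvR s := by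
        rw [show y - pvSy s = -(pvSy s - y) by ring, abs_neg]; omega
      have := abs_le.mp this; omega
    · have h2 : |y - pvSy s| = |pvSy s - y| := by
        rw [show y - pvSy s = -(pvSy s - y) by ring, abs_neg]
      have h3 := abs_le.mp (show |pvSx s - x| ≤ pvR s - |y - pvSy s| by omega)
      omega
    · have h2 : |y - pvSy s| = |pvSy s - y| := by
        rw [show y - pvSy s = -(pvSy s - y) by ring, abs_neg]
      have h3 := abs_le.mp (show |pvSx s - x| ≤ pvR s - |y - pvSy s| by omega)
      omega

lemma mem_cellsA (s : List (List Int)) (y x : Int) :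
    (y, x) ∈ pvCellsA s ↔ |pvSx s - x| + |pvSy s - y| ≤ pvR s := by
  unfold pvCellsA
  simp only [List.mem_flatMap, List.mem_cons, List.mem_map, List.mem_filter,
    PySem.List.mem_pyRange_one, Prod.mk.injEq]
  constructor
  · rintro ⟨x', ⟨hx1, hx2⟩, h⟩
    rcases h with ⟨hy, hx⟩ | ⟨y', ⟨⟨hy1, hy2⟩, hcond⟩, hy, hx⟩
    · subst hx; subst hy
      have : |pvSx s - x| ≤ pvR s := abs_le.mpr (by omega)
      simpa using this
    · subst hx; subst hy
      exact of_decide_eq_true hcond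
  · intro h
    have h1 := abs_nonneg (pvSy s - y)
    have h2 := abs_le.mp (show |pvSx s - x| ≤ pvR s by omega)
    exact ⟨x, ⟨by omega, by omega⟩, Or.inr ⟨y, ⟨⟨by
        have := abs_le.mp (show |pvSy s - y| ≤ pvR s by
          have := abs_nonneg (pvSx s - x); omega)
        omega, by
        have := abs_le.mp (show |pvSy s - y| ≤ pvR s by
          have := abs_nonneg (pvSx s - x); omega)
        omega⟩, decide_eq_true h⟩, rfl, rfl⟩⟩

lemma stepB_eq (s : List (List Int)) (g : PySem.Dict Int (PySem.Dict Int String))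
    (hok : pvOk g) (hpres : ∀ c ∈ pvCells s, pvPres g c.1 c.2) :
    pvStepB s g = (pvCells s).foldl (fun g c => pvSetA g c.1 c.2) g := by
  have hpres' : ∀ dy ∈ PySem.List.pyRange (-(pvR s)) (pvR s + 1),
      ∀ x ∈ PySem.List.pyRange (pvSx s - (pvR s - |dy|)) (pvSx s + (pvR s - |dy|) + 1),
      pvPres g (pvSy s + dy) x := by
    intro dy hdy x hx
    refine hpres (pvSy s + dy, x) ?_
    unfold pvCells
    exact List.mem_flatMap.mpr ⟨dy, hdy, List.mem_map.mpr ⟨x, hx, rfl⟩⟩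
  have hkeys : ∀ dy ∈ PySem.List.pyRange (-(pvR s)) (pvR s + 1), pvSy s + dy ∈ g.keys := by
    intro dy hdy
    have hdy' := PySem.List.mem_pyRange_one.mp hdy
    have ha : |dy| ≤ pvR s := abs_le.mpr (by omega)
    refine mem_keys_of_pres (hpres' dy hdy (pvSx s) (PySem.List.mem_pyRange_one.mpr (by omega)))
  have h := stepB_eq_aux s (PySem.List.pyRange (-(pvR s)) (pvR s + 1)) g hok hkeys hpres'
  simp only [pvSx, pvSy, pvR] at h
  simp only [pvStepB, pvCells, pvSx, pvSy, pvR]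
  exact h

lemma step_eq (s : List (List Int)) (g : PySem.Dict Int (PySem.Dict Int String))
    (hok : pvOk g) (hpres : ∀ c ∈ pvCells s, pvPres g c.1 c.2) :
    pvStepA s g = pvStepB s g := by
  have hpresA : ∀ c ∈ pvCellsA s, pvPres g c.1 c.2 := by
    intro c hc
    refine hpres c ?_
    rw [show c = (c.1, c.2) from rfl] at hc ⊢
    rw [mem_cells]
    exact (mem_cellsA s c.1 c.2).mp hc
  rw [stepA_eq, stepB_eq s g hok hpres,
      fold_setA_eq_GM _ g hok hpresA, fold_setA_eq_GM _ g hok hpres]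
  apply GM_congr; intro y x
  simp only [decide_eq_decide]
  rw [mem_cells, mem_cellsA]

lemma step_eq_GM (s : List (List Int)) (g : PySem.Dict Int (PySem.Dict Int String))
    (hok : pvOk g) (hpres : ∀ c ∈ pvCells s, pvPres g c.1 c.2) :
    pvStepA s g = pvGM (fun y x => decide ((y, x) ∈ pvCells s)) g := by
  have hpresA : ∀ c ∈ pvCellsA s, pvPres g c.1 c.2 := by
    intro c hc
    refine hpres c ?_
    rw [show c = (c.1, c.2) from rfl] at hc ⊢
    rw [mem_cells]
    exact (mem_cellsA s c.1 c.2).mp hc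
  rw [stepA_eq, fold_setA_eq_GM _ g hok hpresA]
  apply GM_congr; intro y x
  simp only [decide_eq_decide]
  rw [mem_cells, mem_cellsA]

lemma fold_steps_eq (sensors : List (List (List Int))) :
    ∀ g : PySem.Dict Int (PySem.Dict Int String), pvOk g →
    (∀ s ∈ sensors, ∀ c ∈ pvCells s, pvPres g c.1 c.2) →
    sensors.foldl (fun g s => pvStepA s g) g = sensors.foldl (fun g s => pvStepB s g) g := by
  induction sensors with
  | nil => intro g _ _; rfl
  | cons s ss ih =>
    intro g hok hpres
    simp only [List.foldl_cons]
    rw [show pvStepB s g = pvStepA s g from (step_eq s g hok (hpres s List.mem_cons_self)).symm]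
    rw [step_eq_GM s g hok (hpres s List.mem_cons_self)]
    exact ih _ ((ok_GM _ _).mpr hok)
      (fun s' hs' c hc => (pres_GM _ _ _ _).mpr (hpres s' (List.mem_cons_of_mem _ hs') c hc))

lemma interval_sub {l : List Int} {a b : Int} {n : Nat} (hnd : l.Nodup)
    (h : (l.filter (fun v => decide (a ≤ v ∧ v ≤ b))).length = n) (hn : (n : Int) = b - a + 1) :
    ∀ v, a ≤ v → v ≤ b → v ∈ l := by
  intro v hav hvb
  have hnd' : (l.filter (fun v => decide (a ≤ v ∧ v ≤ b))).Nodup := hnd.filter _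
  have hsub : (l.filter (fun v => decide (a ≤ v ∧ v ≤ b))).toFinset ⊆ Finset.Icc a b := by
    intro u hu
    rw [List.mem_toFinset] at hu
    have hu2 := List.of_mem_filter hu
    simp only [decide_eq_true_eq] at hu2
    exact Finset.mem_Icc.mpr hu2
  have hcard : (Finset.Icc a b).card ≤ (l.filter (fun v => decide (a ≤ v ∧ v ≤ b))).toFinset.card := by
    rw [List.toFinset_card_of_nodup hnd', h, Int.card_Icc]
    omega
  have heq := Finset.eq_of_subset_of_card_le hsub hcard
  have hv : v ∈ (l.filter (fun v => decide (a ≤ v ∧ v ≤ b))).toFinset := by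
    rw [heq]; exact Finset.mem_Icc.mpr ⟨hav, hvb⟩
  exact List.mem_of_mem_filter (List.mem_toFinset.mp hv)

lemma pres_of_pre {grid : List (Int × List (Int × String))} {s : List (List Int)}
    (h1 : (grid.map Prod.fst).Nodup) (h2 : ∀ p ∈ grid, (p.2.map Prod.fst).Nodup)
    (hrows : ((grid.map Prod.fst).filter
        (fun y => decide (pvSy s - pvR s ≤ y ∧ y ≤ pvSy s + pvR s))).length
      = (2 * pvR s + 1).toNat)
    (hcells : ∀ p ∈ grid, pvSy s - pvR s ≤ p.1 → p.1 ≤ pvSy s + pvR s →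
      ((p.2.map Prod.fst).filter
          (fun x => decide (pvSx s - (pvR s - |p.1 - pvSy s|) ≤ x ∧
                            x ≤ pvSx s + (pvR s - |p.1 - pvSy s|)))).length
        = (2 * (pvR s - |p.1 - pvSy s|) + 1).toNat) :
    ∀ c ∈ pvCells s, ∃ p ∈ grid, p.1 = c.1 ∧ c.2 ∈ p.2.map Prod.fst := by
  intro c hc
  have hr0 : 0 ≤ pvR s := add_nonneg (abs_nonneg _) (abs_nonneg _)
  have hd : |pvSx s - c.2| + |pvSy s - c.1| ≤ pvR s :=
    (mem_cells s c.1 c.2).mp (by exact hc)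
  have habsx := abs_nonneg (pvSx s - c.2)
  have habsy := abs_le.mp (show |pvSy s - c.1| ≤ pvR s by omega)
  have hrn : ((2 * pvR s + 1).toNat : Int) = pvSy s + pvR s - (pvSy s - pvR s) + 1 := by omega
  have hymem : c.1 ∈ grid.map Prod.fst :=
    interval_sub h1 hrows hrn c.1 (by omega) (by omega)
  obtain ⟨p, hp, hp1⟩ := List.mem_map.mp hymem
  refine ⟨p, hp, hp1, ?_⟩
  have hpy : |p.1 - pvSy s| = |pvSy s - c.1| := by
    rw [hp1, show c.1 - pvSy s = -(pvSy s - c.1) by ring, abs_neg]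
  have hxb := abs_le.mp (show |pvSx s - c.2| ≤ pvR s - |p.1 - pvSy s| by rw [hpy]; omega)
  have hcn : ((2 * (pvR s - |p.1 - pvSy s|) + 1).toNat : Int)
      = pvSx s + (pvR s - |p.1 - pvSy s|) - (pvSx s - (pvR s - |p.1 - pvSy s|)) + 1 := by
    have := abs_nonneg (p.1 - pvSy s)
    omega
  exact interval_sub (h2 p hp) (hcells p hp (by rw [hp1]; omega) (by rw [hp1]; omega)) hcn
    c.2 (by omega) (by omega)

lemma ok_toD {grid : List (Int × List (Int × String))}
    (h1 : (grid.map Prod.fst).Nodup) (h2 : ∀ p ∈ grid, (p.2.map Prod.fst).Nodup) :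
    pvOk (pvToD grid) := by
  constructor
  · simpa only [pvToD, PySem.Dict.keys, List.map_map, Function.comp] using h1
  · intro p hp
    obtain ⟨q, hq, rfl⟩ := List.mem_map.mp hp
    simpa only [PySem.Dict.keys] using h2 q hq

lemma pres_toD {grid : List (Int × List (Int × String))} {y x : Int}
    (h : ∃ p ∈ grid, p.1 = y ∧ x ∈ p.2.map Prod.fst) : pvPres (pvToD grid) y x := by
  obtain ⟨p, hp, h1, h2⟩ := h
  exact ⟨(p.1, PySem.Dict.mk p.2), List.mem_map_of_mem hp, h1,
    by simpa only [PySem.Dict.keys] using h2⟩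

-- ===== VERDICT (by name: the statement is the Claim_ definition above) =====
theorem sensor_coverage_spec : Claim_equal_sensor_coverage := by
  intro grid sensors _hdom hpre
  obtain ⟨h1, h2, h3⟩ := hpre
  unfold Spec_sensor_coverage
  rw [portA_eq, portB_eq, fold_steps_eq sensors (pvToD grid) (ok_toD h1 h2)
    (fun s hs c hc => pres_toD
      (pres_of_pre h1 h2 (h3 s hs).2.2.2.1 (h3 s hs).2.2.2.2 c hc))]
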